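-- pv_equiv track=rewrite | github.com/cirosantilli/project-euler-solvers | solvers/315.py | _precompute_small
-- ===== SOURCE A (Python) =====
-- from typing import List, Tuple
--
-- DIGIT_MASKS: List[int] = [
--     0x77,  # 0
--     0x24,  # 1
--     0x5D,  # 2
--     0x6D,  # 3
--     0x2E,  # 4
--     0x6B,  # 5
--     0x7B,  # 6
--     0x27,  # 7
--     0x7F,  # 8
--     0x6F,  # 9
-- ]
--
-- def digit_sum(n: int) -> int:
--     """Return the sum of decimal digits of n (n >= 0)."""
--     s = 0
--     while n:
--         s += n % 10
--         n //= 10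
--     return s
--
-- def segments_of_number(n: int) -> int:
--     """Return a bitmask representing all lit segments for the whole number.
--
--     Digits are right-aligned: the least significant digit occupies the lowest byte,
--     the next digit the next byte, etc. Each byte stores a 7-bit digit mask.
--     """
--     if n == 0:
--         return DIGIT_MASKS[0]
--
--     out = 0
--     shift = 0
--     while n:
--         out |= DIGIT_MASKS[n % 10] << shift
--         n //= 10
--         shift += 8
--     return out
--
-- def _precompute_small(
--     max_digit_sum: int = 72,
-- ) -> Tuple[List[int], List[int], List[int]]:
--     """Precompute helpers for numbers up to max_digit_sum.
--
--     Returns: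
--       seg_small[v]         : segments_of_number(v)
--       sam_from_blank[v]    : Sam total transitions when fed v (starting from blank)
--       max_from_displayed[v]: Max transitions from state 'v is already displayed' until black
--     """
--     seg_small = [segments_of_number(v) for v in range(max_digit_sum + 1)]
--     dsum_small = [digit_sum(v) for v in range(max_digit_sum + 1)]
--
--     # Sam totals starting from blank.
--     sam_from_blank = [-1] * (max_digit_sum + 1)
--
--     def sam_rec(v: int) -> int:
--         if sam_from_blank[v] != -1:
--             return sam_from_blank[v]
--         res = 2 * seg_small[v].bit_count()
--         if v >= 10:
--             res += sam_rec(dsum_small[v])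
--         sam_from_blank[v] = res
--         return res
--
--     for v in range(max_digit_sum + 1):
--         sam_rec(v)
--
--     # Max transitions assuming v is already displayed correctly.
--     max_from_displayed = [-1] * (max_digit_sum + 1)
--
--     def max_rec(v: int) -> int:
--         if max_from_displayed[v] != -1:
--             return max_from_displayed[v]
--         if v < 10:
--             res = seg_small[v].bit_count()  # just turn it off
--         else:
--             nxt = dsum_small[v]
--             res = (seg_small[v] ^ seg_small[nxt]).bit_count() + max_rec(nxt)
--         max_from_displayed[v] = res
--         return res
--
--     for v in range(max_digit_sum + 1):
--         max_rec(v)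
--
--     return seg_small, sam_from_blank, max_from_displayed
-- ===== SOURCE B (Python) =====
-- from typing import List, Tuple
--
-- DIGIT_MASKS: List[int] = [
--     0x77, 0x24, 0x5D, 0x6D, 0x2E, 0x6B, 0x7B, 0x27, 0x7F, 0x6F,
-- ]
--
-- def digit_sum(n: int) -> int:
--     s = 0
--     while n:
--         s += n % 10
--         n //= 10
--     return s
--
-- def segments_of_number(n: int) -> int:
--     if n == 0:
--         return DIGIT_MASKS[0]
--     out = 0
--     shift = 0
--     while n:
--         out |= DIGIT_MASKS[n % 10] << shift
--         n //= 10
--         shift += 8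
--     return out
--
-- def _precompute_small(
--     max_digit_sum: int = 72,
-- ) -> Tuple[List[int], List[int], List[int]]:
--     seg_small = [segments_of_number(v) for v in range(max_digit_sum + 1)]
--     dsum_small = [digit_sum(v) for v in range(max_digit_sum + 1)]
--
--     # Bottom-up: digit_sum(v) < v for v >= 10, so the dependency is already filled.
--     sam_from_blank: List[int] = []
--     for v in range(max_digit_sum + 1):
--         res = 2 * seg_small[v].bit_count()
--         if v >= 10:
--             res += sam_from_blank[dsum_small[v]]
--         sam_from_blank.append(res)
--
--     max_from_displayed: List[int] = []
--     for v in range(max_digit_sum + 1):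
--         if v < 10:
--             res = seg_small[v].bit_count()
--         else:
--             nxt = dsum_small[v]
--             res = (seg_small[v] ^ seg_small[nxt]).bit_count() + max_from_displayed[nxt]
--         max_from_displayed.append(res)
--
--     return seg_small, sam_from_blank, max_from_displayed
-- ===== Notes on version B (the rewrite author's own statement) =====
-- stated objective: simpler
-- what changed: Replaced A's two memoized recursive helpers (sam_rec/max_rec with -1 sentinel arrays) by plain bottom-up loops that append each value computed from the already-filled prefix, exploiting digit_sum(v) < v for v >= 10.
import Mathlib
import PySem

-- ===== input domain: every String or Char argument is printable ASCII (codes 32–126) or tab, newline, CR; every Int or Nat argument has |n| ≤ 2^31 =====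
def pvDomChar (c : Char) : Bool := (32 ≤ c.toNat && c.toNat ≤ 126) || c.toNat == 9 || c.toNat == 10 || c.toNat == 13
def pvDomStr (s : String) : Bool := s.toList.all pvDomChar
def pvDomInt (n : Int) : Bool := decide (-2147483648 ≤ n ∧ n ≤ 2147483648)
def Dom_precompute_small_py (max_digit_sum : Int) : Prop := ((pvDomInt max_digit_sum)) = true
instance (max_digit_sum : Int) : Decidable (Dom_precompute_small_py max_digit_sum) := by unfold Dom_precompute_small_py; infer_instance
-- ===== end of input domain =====

-- B replaces A's two memoized recursive helpers by bottom-up DP loops (digit_sum(v) < v for v ≥ 10), same three tables; objective: simpler.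


-- ===== PORT A =====
-- Module helpers shared by both Python files (identical code in Source A and Source B).
def digitMasks : List Int := [0x77, 0x24, 0x5D, 0x6D, 0x2E, 0x6B, 0x7B, 0x27, 0x7F, 0x6F]

-- 'while n:' loop; fuel n.natAbs+1 exceeds the iteration count for every n ≥ 0 (the only calls made).
def digitSumGo : Nat → Int → Int → Int
  | 0, s, _ => s
  | f + 1, s, n =>
    if n ≠ 0 then digitSumGo f (s + PySem.Int.mod n 10) (PySem.Int.floordiv n 10) else s

def digit_sum_py (n : Int) : Int := digitSumGo (n.natAbs + 1) 0 n

-- 'while n:' loop of segments_of_number; shift is a Nat (Python's shift stays ≥ 0); exact for n ≥ 0.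
def segGo : Nat → Int → Nat → Int → Int
  | 0, out, _, _ => out
  | f + 1, out, shift, n =>
    if n ≠ 0 then
      segGo f (PySem.Int.bor out (PySem.List.pyGetD digitMasks (PySem.Int.mod n 10) 0 <<< shift))
        (shift + 8) (PySem.Int.floordiv n 10)
    else out

def segments_of_number_py (n : Int) : Int :=
  if n = 0 then PySem.List.pyGetD digitMasks 0 0
  else segGo (n.natAbs + 1) 0 0 n

def pvRangeN (max_digit_sum : Int) : List Int := PySem.List.pyRange 0 (max_digit_sum + 1) 1

def segSmall (max_digit_sum : Int) : List Int := (pvRangeN max_digit_sum).map segments_of_number_py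
def dsumSmall (max_digit_sum : Int) : List Int := (pvRangeN max_digit_sum).map digit_sum_py

-- sam_rec: memo list as state; fuel bounds the recursion depth (Python's is finite; fuel v+1 is ample).
def samRecA (seg dsum : List Int) : Nat → List Int → Int → List Int × Int
  | 0, memo, _ => (memo, 0)
  | f + 1, memo, v =>
    let cur := PySem.List.pyGetD memo v (-1)
    if cur ≠ -1 then (memo, cur)
    else
      let res0 := 2 * (PySem.Int.bitCount (PySem.List.pyGetD seg v 0) : Int)
      if v ≥ 10 then
        let p := samRecA seg dsum f memo (PySem.List.pyGetD dsum v 0)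
        let res := res0 + p.2
        (PySem.List.pySetD p.1 v res, res)
      else
        (PySem.List.pySetD memo v res0, res0)

-- max_rec: same memoized shape.
def maxRecA (seg dsum : List Int) : Nat → List Int → Int → List Int × Int
  | 0, memo, _ => (memo, 0)
  | f + 1, memo, v =>
    let cur := PySem.List.pyGetD memo v (-1)
    if cur ≠ -1 then (memo, cur)
    else
      if v < 10 then
        let res := (PySem.Int.bitCount (PySem.List.pyGetD seg v 0) : Int)
        (PySem.List.pySetD memo v res, res)
      else
        let nxt := PySem.List.pyGetD dsum v 0
        let p := maxRecA seg dsum f memo nxt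
        let res := (PySem.Int.bitCount (PySem.Int.bxor (PySem.List.pyGetD seg v 0)
            (PySem.List.pyGetD seg nxt 0)) : Int) + p.2
        (PySem.List.pySetD p.1 v res, res)

def precompute_small_py (max_digit_sum : Int) : List Int × List Int × List Int :=
  let seg := segSmall max_digit_sum
  let dsum := dsumSmall max_digit_sum
  let sam := (pvRangeN max_digit_sum).foldl
    (fun memo v => (samRecA seg dsum (v.natAbs + 1) memo v).1)
    (List.replicate (max_digit_sum + 1).toNat (-1))
  let md := (pvRangeN max_digit_sum).foldl
    (fun memo v => (maxRecA seg dsum (v.natAbs + 1) memo v).1)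
    (List.replicate (max_digit_sum + 1).toNat (-1))
  (seg, sam, md)

-- ===== PORT B =====
def precompute_small_py_alt (max_digit_sum : Int) : List Int × List Int × List Int :=
  let seg := segSmall max_digit_sum
  let dsum := dsumSmall max_digit_sum
  let sam := (pvRangeN max_digit_sum).foldl
    (fun acc v =>
      acc ++ [2 * (PySem.Int.bitCount (PySem.List.pyGetD seg v 0) : Int) +
        (if v ≥ 10 then PySem.List.pyGetD acc (PySem.List.pyGetD dsum v 0) 0 else 0)]) []
  let md := (pvRangeN max_digit_sum).foldl
    (fun acc v =>
      acc ++ [if v < 10 then (PySem.Int.bitCount (PySem.List.pyGetD seg v 0) : Int)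
        else
          let nxt := PySem.List.pyGetD dsum v 0
          (PySem.Int.bitCount (PySem.Int.bxor (PySem.List.pyGetD seg v 0)
            (PySem.List.pyGetD seg nxt 0)) : Int) + PySem.List.pyGetD acc nxt 0]) []
  (seg, sam, md)

-- ===== PRECONDITION & SPEC =====
def Spec_precompute_small_py (max_digit_sum : Int) (out : List Int × List Int × List Int) : Prop := out = precompute_small_py_alt max_digit_sum
instance (max_digit_sum : Int) (out : List Int × List Int × List Int) : Decidable (Spec_precompute_small_py max_digit_sum out) := by unfold Spec_precompute_small_py; infer_instance

-- ===== CLAIM (what is proved, stated in full; the proofs are below) =====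
def Claim_equal_precompute_small_py : Prop := ∀ (max_digit_sum : Int), Dom_precompute_small_py max_digit_sum → Spec_precompute_small_py max_digit_sum (precompute_small_py max_digit_sum)

-- ===== LEMMAS AND PROOFS =====

-- Pure digit sum on Nat.
def dsNat (n : Nat) : Nat :=
  if h : n = 0 then 0 else n % 10 + dsNat (n / 10)
termination_by n
decreasing_by exact Nat.div_lt_self (Nat.pos_of_ne_zero h) (by norm_num)

theorem dsNat_le (n : Nat) : dsNat n ≤ n := by
  induction n using Nat.strong_induction_on with
  | _ n ih =>
    rw [dsNat]
    split
    · omega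
    · have h1 := ih (n / 10) (Nat.div_lt_self (by omega) (by norm_num))
      omega

theorem dsNat_lt (n : Nat) (h : 10 ≤ n) : dsNat n < n := by
  rw [dsNat]
  split
  · omega
  · have h1 := dsNat_le (n / 10)
    omega

theorem digitSumGo_eq (fuel : Nat) : ∀ (n : Nat) (s : Int), n < fuel →
    digitSumGo fuel s (n : Int) = s + (dsNat n : Int) := by
  induction fuel with
  | zero => intro n s h; omega
  | succ f ih =>
    intro n s h
    by_cases hn : n = 0
    · subst hn; simp [digitSumGo, dsNat]
    · rw [digitSumGo]
      rw [if_pos (by exact_mod_cast hn)]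
      rw [show (10:Int) = ((10:Nat):Int) by norm_num, PySem.Int.mod_natCast, PySem.Int.floordiv_natCast]
      have hlt : n / 10 < f := by
        have := Nat.div_lt_self (Nat.pos_of_ne_zero hn) (by norm_num : (1:Nat) < 10)
        omega
      rw [ih (n / 10) _ hlt]
      conv_rhs => rw [dsNat, dif_neg hn]
      push_cast
      ring

theorem digit_sum_py_nat (n : Nat) : digit_sum_py (n : Int) = (dsNat n : Int) := by
  unfold digit_sum_py
  rw [show ((n : Int).natAbs + 1) = n + 1 by simp]
  rw [digitSumGo_eq (n + 1) n 0 (by omega)]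
  ring

-- abbreviations for the spec values
def svN (v : Nat) : Int := segments_of_number_py (v : Int)

def samV (v : Nat) : Int :=
  2 * (PySem.Int.bitCount (svN v) : Int) + (if h : 10 ≤ v then samV (dsNat v) else 0)
termination_by v
decreasing_by exact dsNat_lt v h

def mdV (v : Nat) : Int :=
  if h : v < 10 then (PySem.Int.bitCount (svN v) : Int)
  else (PySem.Int.bitCount (PySem.Int.bxor (svN v) (svN (dsNat v))) : Int) + mdV (dsNat v)
termination_by v
decreasing_by exact dsNat_lt v (by omega)

theorem samV_nonneg (v : Nat) : 0 ≤ samV v := by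
  induction v using Nat.strong_induction_on with
  | _ v ih =>
    rw [samV]
    split
    · have := ih (dsNat v) (dsNat_lt v (by omega))
      positivity
    · positivity

theorem mdV_nonneg (v : Nat) : 0 ≤ mdV v := by
  induction v using Nat.strong_induction_on with
  | _ v ih =>
    rw [mdV]
    split
    · positivity
    · have := ih (dsNat v) (dsNat_lt v (by omega))
      positivity

-- lookups into the two precomputed tables
theorem pvRangeN_eq (m : Int) : pvRangeN m = (List.range (m+1).toNat).map (fun (k : Nat) => (k : Int)) := by
  unfold pvRangeN
  rw [PySem.List.pyRange_one]; simp [List.map_eq_flatMap]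

theorem seg_lookup (m : Int) (k : Nat) (hk : k < (m+1).toNat) :
    PySem.List.pyGetD (segSmall m) (k : Int) 0 = svN k := by
  unfold segSmall svN pvRangeN
  exact PySem.List.pyGetD_map_pyRange_of_nonneg _ _ _ _ (by positivity) (by omega)

theorem dsum_lookup (m : Int) (k : Nat) (hk : k < (m+1).toNat) :
    PySem.List.pyGetD (dsumSmall m) (k : Int) 0 = (dsNat k : Int) := by
  unfold dsumSmall pvRangeN
  rw [PySem.List.pyGetD_map_pyRange_of_nonneg _ _ _ _ (by positivity) (by omega)]
  exact digit_sum_py_nat k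

theorem seg_lookup' (m : Int) (k : Nat) (hk : k < (m+1).toNat) :
    (segSmall m).getD k 0 = svN k := by
  rw [← PySem.List.pyGetD_natCast]; exact seg_lookup m k hk

-- the partially filled memo array after the first k loop iterations
def memoK (f : Nat → Int) (N k : Nat) : List Int :=
  (List.range k).map f ++ List.replicate (N - k) (-1)

theorem memoK_get_lt (f : Nat → Int) (N k j : Nat) (hj : j < k) :
    PySem.List.pyGetD (memoK f N k) (j : Int) (-1) = f j := by
  unfold memoK
  rw [PySem.List.pyGetD_natCast]
  have hl : j < ((List.range k).map f).length := by simpa using hj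
  simp [List.getD, List.getElem?_append_left hl, hj]

theorem memoK_get_self (f : Nat → Int) (N k : Nat) (hk : k < N) :
    PySem.List.pyGetD (memoK f N k) (k : Int) (-1) = -1 := by
  unfold memoK
  rw [PySem.List.pyGetD_natCast]
  have h0 : 0 < N - k := by omega
  have hlen : ((List.range k).map f).length = k := by simp
  rw [show ((k:Nat)) = ((List.range k).map f).length from hlen.symm]
  simp [List.getD, h0]

theorem memoK_set (f : Nat → Int) (N k : Nat) (hk : k < N) (v : Int) (hv : v = f k) :
    PySem.List.pySetD (memoK f N k) (k : Int) v = memoK f N (k+1) := by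
  unfold memoK
  rw [PySem.List.pySetD_natCast]
  have hlen : ((List.range k).map f).length = k := by simp
  rw [show ((k:Nat)) = ((List.range k).map f).length from hlen.symm]
  rw [List.set_append]
  simp only [List.length_map, List.length_range, lt_irrefl]
  rw [Nat.sub_self]
  rw [show N - k = (N - (k+1)) + 1 by omega]
  simp [List.range_succ, hv, List.replicate_succ]

theorem samRecA_step (m : Int) (k : Nat) (hk : k < (m+1).toNat) :
    samRecA (segSmall m) (dsumSmall m) (k+1) (memoK samV (m+1).toNat k) (k : Int)
      = (memoK samV (m+1).toNat (k+1), samV k) := by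
  rw [samRecA]
  simp only [memoK_get_self samV _ k hk, ne_eq, not_true_eq_false, if_false]
  rw [seg_lookup m k hk]
  by_cases h10 : 10 ≤ k
  · rw [if_pos (by exact_mod_cast h10)]
    rw [dsum_lookup m k hk]
    have hd : dsNat k < k := dsNat_lt k h10
    rw [show k = (k-1)+1 by omega]  -- expose the successor fuel of the inner call
    rw [samRecA]
    rw [show (k-1)+1 = k by omega]
    rw [memoK_get_lt samV _ k (dsNat k) hd]
    rw [if_pos (by have := samV_nonneg (dsNat k); intro hc; omega)]
    have hval : 2 * (PySem.Int.bitCount (svN k) : Int) + samV (dsNat k) = samV k := by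
      conv_rhs => rw [samV, dif_pos h10]
    rw [hval, memoK_set samV _ k hk _ rfl]
  · rw [if_neg (by exact_mod_cast h10)]
    have hval : 2 * (PySem.Int.bitCount (svN k) : Int) = samV k := by
      conv_rhs => rw [samV, dif_neg h10]
      ring
    rw [hval, memoK_set samV _ k hk _ rfl]

theorem memoK_full (f : Nat → Int) (N : Nat) : memoK f N N = (List.range N).map f := by
  simp [memoK]

theorem samLoopA_eq (m : Int) (k : Nat) (hk : k ≤ (m+1).toNat) :
    ((List.range k).map (fun (j : Nat) => (j : Int))).foldl
      (fun memo v => (samRecA (segSmall m) (dsumSmall m) (v.natAbs + 1) memo v).1)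
      (List.replicate (m+1).toNat (-1)) = memoK samV (m+1).toNat k := by
  induction k with
  | zero => simp [memoK]
  | succ k ih =>
    rw [List.range_succ, List.map_append, List.foldl_append, ih (by omega)]
    simp only [List.map_cons, List.map_nil, List.foldl_cons, List.foldl_nil, Int.natAbs_natCast]
    rw [samRecA_step m k (by omega)]

theorem samFoldB_eq (m : Int) (k : Nat) (hk : k ≤ (m+1).toNat) :
    ((List.range k).map (fun (j : Nat) => (j : Int))).foldl
      (fun acc v =>
        acc ++ [2 * (PySem.Int.bitCount (PySem.List.pyGetD (segSmall m) v 0) : Int) +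
          (if v ≥ 10 then PySem.List.pyGetD acc (PySem.List.pyGetD (dsumSmall m) v 0) 0 else 0)])
      [] = (List.range k).map samV := by
  induction k with
  | zero => simp
  | succ k ih =>
    rw [List.range_succ, List.map_append, List.foldl_append, ih (by omega)]
    simp only [List.map_cons, List.map_nil, List.foldl_cons, List.foldl_nil]
    rw [seg_lookup m k (by omega), List.map_append]
    congr 1
    simp only [List.map_cons, List.map_nil, List.cons.injEq, and_true]
    by_cases h10 : 10 ≤ k
    · rw [if_pos (by exact_mod_cast h10), dsum_lookup m k (by omega)]
      rw [PySem.List.pyGetD_natCast, PySem.List.getD_map_range _ _ _ _ (dsNat_lt k h10)]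
      conv_rhs => rw [samV, dif_pos h10]
    · rw [if_neg (by exact_mod_cast h10)]
      conv_rhs => rw [samV, dif_neg h10]

theorem maxRecA_step (m : Int) (k : Nat) (hk : k < (m+1).toNat) :
    maxRecA (segSmall m) (dsumSmall m) (k+1) (memoK mdV (m+1).toNat k) (k : Int)
      = (memoK mdV (m+1).toNat (k+1), mdV k) := by
  rw [maxRecA]
  simp only [memoK_get_self mdV _ k hk, ne_eq, not_true_eq_false, if_false]
  by_cases h10 : k < 10
  · rw [if_pos (by exact_mod_cast h10), seg_lookup m k hk]
    have hval : (PySem.Int.bitCount (svN k) : Int) = mdV k := by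
      conv_rhs => rw [mdV, dif_pos h10]
    rw [hval, memoK_set mdV _ k hk _ rfl]
  · rw [if_neg (by exact_mod_cast h10), dsum_lookup m k hk]
    have h10' : 10 ≤ k := by omega
    have hd : dsNat k < k := dsNat_lt k h10'
    rw [show k = (k-1)+1 by omega]  -- expose the successor fuel of the inner call
    rw [maxRecA]
    rw [show (k-1)+1 = k by omega]
    rw [memoK_get_lt mdV _ k (dsNat k) hd]
    rw [if_pos (by have := mdV_nonneg (dsNat k); intro hc; omega)]
    rw [seg_lookup m k hk, seg_lookup m (dsNat k) (by omega)]
    have hval : (PySem.Int.bitCount (PySem.Int.bxor (svN k) (svN (dsNat k))) : Int) + mdV (dsNat k) = mdV k := by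
      conv_rhs => rw [mdV, dif_neg h10]
    rw [hval, memoK_set mdV _ k hk _ rfl]

theorem maxLoopA_eq (m : Int) (k : Nat) (hk : k ≤ (m+1).toNat) :
    ((List.range k).map (fun (j : Nat) => (j : Int))).foldl
      (fun memo v => (maxRecA (segSmall m) (dsumSmall m) (v.natAbs + 1) memo v).1)
      (List.replicate (m+1).toNat (-1)) = memoK mdV (m+1).toNat k := by
  induction k with
  | zero => simp [memoK]
  | succ k ih =>
    rw [List.range_succ, List.map_append, List.foldl_append, ih (by omega)]
    simp only [List.map_cons, List.map_nil, List.foldl_cons, List.foldl_nil, Int.natAbs_natCast]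
    rw [maxRecA_step m k (by omega)]

theorem mdFoldB_eq (m : Int) (k : Nat) (hk : k ≤ (m+1).toNat) :
    ((List.range k).map (fun (j : Nat) => (j : Int))).foldl
      (fun acc v =>
        acc ++ [if v < 10 then (PySem.Int.bitCount (PySem.List.pyGetD (segSmall m) v 0) : Int)
          else
            let nxt := PySem.List.pyGetD (dsumSmall m) v 0
            (PySem.Int.bitCount (PySem.Int.bxor (PySem.List.pyGetD (segSmall m) v 0)
              (PySem.List.pyGetD (segSmall m) nxt 0)) : Int) + PySem.List.pyGetD acc nxt 0])
      [] = (List.range k).map mdV := by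
  induction k with
  | zero => simp
  | succ k ih =>
    rw [List.range_succ, List.map_append, List.foldl_append, ih (by omega)]
    simp only [List.map_cons, List.map_nil, List.foldl_cons, List.foldl_nil]
    rw [List.map_append]
    congr 1
    simp only [List.map_cons, List.map_nil, List.cons.injEq, and_true]
    by_cases h10 : k < 10
    · rw [if_pos (by exact_mod_cast h10), seg_lookup m k (by omega)]
      conv_rhs => rw [mdV, dif_pos h10]
    · have h10' : 10 ≤ k := by omega
      rw [if_neg (by exact_mod_cast h10)]
      simp only [dsum_lookup m k (by omega), seg_lookup m k (by omega),
        PySem.List.pyGetD_natCast,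
        seg_lookup' m (dsNat k) (by have := dsNat_lt k h10'; omega),
        PySem.List.getD_map_range _ _ _ _ (dsNat_lt k h10')]
      conv_rhs => rw [mdV, dif_neg h10]

-- ===== VERDICT (by name: the statement is the Claim_ definition above) =====
theorem precompute_small_py_spec : Claim_equal_precompute_small_py := by
  intro m _
  unfold Spec_precompute_small_py precompute_small_py precompute_small_py_alt
  rw [pvRangeN_eq]
  refine congrArg₂ Prod.mk rfl (congrArg₂ Prod.mk ?_ ?_)
  · rw [samLoopA_eq m _ (le_refl _), samFoldB_eq m _ (le_refl _), memoK_full]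
  · rw [maxLoopA_eq m _ (le_refl _), mdFoldB_eq m _ (le_refl _), memoK_full]
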